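-- pv_equiv track=rewrite | github.com/CoffeeAndConvexity/GUARD | security_game/interdiction_protocol.py | stationary_interdiction
-- ===== SOURCE A (Python) =====
-- def stationary_interdiction(stationary_attacker_positions, defender_strategy, defense_time):
--     """
--     Determine which stationary attackers are interdicted by defenders.
--
--     stationary_attacker_positions: List of target nodes chosen by stationary attackers.
--     defender_strategy: List of defender positions over all timesteps (list of lists).
--     defense_time: Number of timesteps a defender must spend at a target to interdict it.
--     return: A list of booleans indicating whether each stationary attacker is interdicted.
--     """
--     # Count the number of timesteps defenders spend at each target
--     defended_targets = {}
--     for defender_positions in defender_strategy: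
--         for defender_position in defender_positions:
--             if defender_position not in defended_targets:
--                 defended_targets[defender_position] = 0
--             defended_targets[defender_position] += 1
--
--     # Determine interdiction for each stationary attacker
--     interdicted = []
--     for attacker_target in stationary_attacker_positions:
--         if defended_targets.get(attacker_target, 0) >= defense_time:
--             interdicted.append(True)
--         else:
--             interdicted.append(False)
--
--     return interdicted
-- ===== SOURCE B (Python) =====
-- def stationary_interdiction(stationary_attacker_positions, defender_strategy, defense_time):
--     return [sum(dp.count(t) for dp in defender_strategy) >= defense_time
--             for t in stationary_attacker_positions]
-- ===== Notes on version B (the rewrite author's own statement) =====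
-- stated objective: simpler
-- what changed: Drops the precomputed per-target count dictionary: B is a one-line comprehension that recomputes each attacker target's defense count directly by summing dp.count(target) over the raw defender strategy.
import Mathlib
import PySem

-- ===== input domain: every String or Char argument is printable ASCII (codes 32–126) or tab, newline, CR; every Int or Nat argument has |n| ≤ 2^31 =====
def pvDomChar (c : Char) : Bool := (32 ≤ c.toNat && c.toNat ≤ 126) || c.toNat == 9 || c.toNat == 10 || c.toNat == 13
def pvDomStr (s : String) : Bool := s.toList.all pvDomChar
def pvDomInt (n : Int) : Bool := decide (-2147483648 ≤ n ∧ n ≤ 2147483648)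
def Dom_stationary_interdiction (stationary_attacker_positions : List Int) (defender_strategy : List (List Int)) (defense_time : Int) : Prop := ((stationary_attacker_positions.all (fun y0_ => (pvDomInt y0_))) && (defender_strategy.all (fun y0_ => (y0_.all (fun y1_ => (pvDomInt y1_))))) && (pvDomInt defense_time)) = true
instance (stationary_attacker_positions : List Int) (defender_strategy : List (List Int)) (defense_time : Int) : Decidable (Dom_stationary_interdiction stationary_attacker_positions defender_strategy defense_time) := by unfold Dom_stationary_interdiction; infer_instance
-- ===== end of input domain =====

-- B replaces A's precomputed per-target count dictionary by a direct per-attacker recount over the raw defender strategy (objective: simpler).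


-- ===== PORT A =====
-- One-pass helper for A's inner loop body: `if p not in d: d[p] = 0` then `d[p] += 1`.
def siStepA (d : PySem.Dict Int Int) (p : Int) : PySem.Dict Int Int :=
  let d1 := if d.contains p then d else d.insert p 0
  d1.modify p 0 (· + 1)

def stationary_interdiction (stationary_attacker_positions : List Int) (defender_strategy : List (List Int)) (defense_time : Int) : List Bool :=
  let defended_targets : PySem.Dict Int Int :=
    defender_strategy.foldl (fun d defender_positions =>
      defender_positions.foldl (fun d defender_position => siStepA d defender_position) d)
      PySem.Dict.empty
  stationary_attacker_positions.foldl (fun interdicted attacker_target =>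
    if defended_targets.getD attacker_target 0 ≥ defense_time then
      interdicted ++ [true]
    else
      interdicted ++ [false]) []

-- ===== PORT B =====
def stationary_interdiction_alt (stationary_attacker_positions : List Int) (defender_strategy : List (List Int)) (defense_time : Int) : List Bool :=
  stationary_attacker_positions.map (fun t =>
    decide (defender_strategy.foldl (fun s dp => s + (PySem.List.count dp t : Int)) 0 ≥ defense_time))

-- ===== PRECONDITION & SPEC =====
def Spec_stationary_interdiction (stationary_attacker_positions : List Int) (defender_strategy : List (List Int)) (defense_time : Int) (out : List Bool) : Prop := out = stationary_interdiction_alt stationary_attacker_positions defender_strategy defense_time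
instance (stationary_attacker_positions : List Int) (defender_strategy : List (List Int)) (defense_time : Int) (out : List Bool) : Decidable (Spec_stationary_interdiction stationary_attacker_positions defender_strategy defense_time out) := by unfold Spec_stationary_interdiction; infer_instance

-- ===== CLAIM (what is proved, stated in full; the proofs are below) =====
def Claim_equal_stationary_interdiction : Prop := ∀ (stationary_attacker_positions : List Int) (defender_strategy : List (List Int)) (defense_time : Int), Dom_stationary_interdiction stationary_attacker_positions defender_strategy defense_time → Spec_stationary_interdiction stationary_attacker_positions defender_strategy defense_time (stationary_interdiction stationary_attacker_positions defender_strategy defense_time)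

-- ===== LEMMAS AND PROOFS =====

lemma siStepA_getD (d : PySem.Dict Int Int) (p t : Int) :
    (siStepA d p).getD t 0 = d.getD t 0 + (if p = t then 1 else 0) := by
  unfold siStepA
  have hts : ∀ (h : ¬ t = p), ¬ p = t := fun h hp => h hp.symm
  by_cases hc : d.contains p
  · by_cases h : t = p
    · subst h; simp [hc]
    · simp [hc, PySem.Dict.getD_modify, h, hts h]
  · have h0 : d.getD p 0 = 0 := by
      have hn : d.get? p = none := by
        rw [PySem.Dict.get?_eq_none_iff_contains]; simpa using hc
      simp [PySem.Dict.getD, hn]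
    by_cases h : t = p
    · subst h; simp [hc, h0]
    · simp [hc, PySem.Dict.getD_modify, PySem.Dict.getD_insert, h, hts h]

lemma siInner_getD (ps : List Int) (d : PySem.Dict Int Int) (t : Int) :
    (ps.foldl (fun d p => siStepA d p) d).getD t 0 = d.getD t 0 + (ps.count t : Int) := by
  induction ps generalizing d with
  | nil => simp
  | cons p ps ih =>
      simp only [List.foldl_cons, ih, siStepA_getD, List.count_cons]
      by_cases h : p = t
      · simp [h, beq_iff_eq]; ring
      · simp [h, beq_iff_eq]

lemma siSum_shift (dss : List (List Int)) (t c s : Int) :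
    dss.foldl (fun s dp => s + (PySem.List.count dp t : Int)) (s + c)
      = dss.foldl (fun s dp => s + (PySem.List.count dp t : Int)) s + c := by
  induction dss generalizing s with
  | nil => simp
  | cons ps dss ih =>
      simp only [List.foldl_cons]
      rw [show s + c + (PySem.List.count ps t : Int)
            = s + (PySem.List.count ps t : Int) + c by ring, ih]

lemma siOuter_getD (dss : List (List Int)) (d : PySem.Dict Int Int) (t : Int) (s : Int) :
    (dss.foldl (fun d ps => ps.foldl (fun d p => siStepA d p) d) d).getD t 0 + s
      = d.getD t 0 + dss.foldl (fun s dp => s + (PySem.List.count dp t : Int)) s := by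
  induction dss generalizing d s with
  | nil => simp
  | cons ps dss ih =>
      simp only [List.foldl_cons]
      rw [ih (ps.foldl (fun d p => siStepA d p) d) s, siInner_getD]
      rw [siSum_shift dss t (PySem.List.count ps t : Int) s]
      simp [PySem.List.count]
      ring

lemma siAppend (dt : Int) (f : Int → Int) (l : List Int) (acc : List Bool) :
    l.foldl (fun a x => if f x ≥ dt then a ++ [true] else a ++ [false]) acc
      = acc ++ l.map (fun x => decide (f x ≥ dt)) := by
  induction l generalizing acc with
  | nil => simp
  | cons x l ih => by_cases h : f x ≥ dt <;> simp [h, ih]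

-- ===== VERDICT (by name: the statement is the Claim_ definition above) =====
theorem stationary_interdiction_spec : Claim_equal_stationary_interdiction := by
  intro ap ds dt _
  unfold Spec_stationary_interdiction stationary_interdiction stationary_interdiction_alt
  have hf : ∀ t : Int,
      (ds.foldl (fun d ps => ps.foldl (fun d p => siStepA d p) d) PySem.Dict.empty).getD t 0
        = ds.foldl (fun s dp => s + (PySem.List.count dp t : Int)) 0 := by
    intro t
    have h := siOuter_getD ds PySem.Dict.empty t 0
    simpa using h
  simp only [hf]
  rw [siAppend dt (fun t => ds.foldl (fun s dp => s + (PySem.List.count dp t : Int)) 0) ap []]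
  simp
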